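-- pv_equiv track=rewrite | github.com/xiahutao/gpLearn | HMM/隐马尔科夫状态图zf.py | CrossUnder
-- ===== SOURCE A (Python) =====
-- def CrossUnder(price1, price2):
--     Con = [False]
--     Precon = False
--     conter = 0
--     for i in range(1, len(price1)):
--         if (price1[i] < price2[i]):
--             conter = 1
--             Con1 = price1[i - 1] == price2[i - 1]
--             while (Con1 == True and i - conter > 0):
--                 conter = conter + 1
--                 Con1 = (price1[i - conter] == price2[i - conter])
--             Precon = (price1[i - conter] > price2[i - conter])
--             Con.append(Precon)
--             conter = 0
--         else:
--             Con.append(False)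
--             conter = 0
--     return Con
-- ===== SOURCE B (Python) =====
-- def CrossUnder(price1, price2):
--     out = [False]
--     above = False
--     for i in range(1, len(price1)):
--         if price1[i - 1] != price2[i - 1]:
--             above = price1[i - 1] > price2[i - 1]
--         out.append(price1[i] < price2[i] and above)
--     return out
-- ===== Notes on version B (the rewrite author's own statement) =====
-- stated objective: alternative
-- what changed: Replaces A's per-index backward while-scan for the most recent unequal pair with a single forward pass that tracks the comparison sign of the last unequal pair.
import Mathlib
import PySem

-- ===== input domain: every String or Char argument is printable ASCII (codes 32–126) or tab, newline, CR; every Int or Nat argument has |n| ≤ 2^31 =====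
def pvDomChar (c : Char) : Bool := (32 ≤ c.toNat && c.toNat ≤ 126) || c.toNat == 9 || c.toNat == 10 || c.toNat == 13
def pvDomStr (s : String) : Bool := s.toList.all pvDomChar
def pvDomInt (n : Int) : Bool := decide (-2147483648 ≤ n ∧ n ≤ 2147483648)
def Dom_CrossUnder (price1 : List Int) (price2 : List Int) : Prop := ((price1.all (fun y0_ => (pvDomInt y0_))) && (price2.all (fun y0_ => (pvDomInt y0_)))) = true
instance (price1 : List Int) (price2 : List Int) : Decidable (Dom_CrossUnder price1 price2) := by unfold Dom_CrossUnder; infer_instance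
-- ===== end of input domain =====

-- ===== PORT A =====
-- B replaces A's per-index backward scan by a single forward pass tracking the last unequal pair's sign; equivalence on lists where no IndexError occurs.
-- Every list index A and B use is ≥ 0 and < price1.length, and Pre_ gives price2 at least that length,
-- so Nat getD is exact for Python's xs[i] here.
def pvG (xs : List Int) (i : Nat) : Int := xs.getD i 0

-- A's inner while loop: conter += 1; Con1 = (price1[i-conter] == price2[i-conter]) while Con1 and i-conter>0.
def pvGoA (p1 p2 : List Int) (i conter : Nat) (con1 : Bool) : Nat :=
  if h : con1 = true ∧ 0 < i - conter then
    pvGoA p1 p2 i (conter + 1) (decide (pvG p1 (i - conter - 1) = pvG p2 (i - conter - 1)))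
  else conter
termination_by i - conter
decreasing_by omega

def CrossUnder (price1 : List Int) (price2 : List Int) : List Bool :=
  (List.range' 1 (price1.length - 1)).foldl
    (fun con i =>
      if pvG price1 i < pvG price2 i then
        -- conter = 1; Con1 = price1[i-1] == price2[i-1]; while ...; Precon = price1[i-conter] > price2[i-conter]
        let conter := pvGoA price1 price2 i 1 (decide (pvG price1 (i - 1) = pvG price2 (i - 1)))
        con ++ [decide (pvG price1 (i - conter) > pvG price2 (i - conter))]
      else con ++ [false])
    [false]

-- ===== PORT B =====
def CrossUnder_alt (price1 : List Int) (price2 : List Int) : List Bool :=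
  ((List.range' 1 (price1.length - 1)).foldl
    (fun (s : List Bool × Bool) i =>
      let above := if pvG price1 (i - 1) ≠ pvG price2 (i - 1)
                   then decide (pvG price1 (i - 1) > pvG price2 (i - 1)) else s.2
      (s.1 ++ [decide (pvG price1 i < pvG price2 i) && above], above))
    ([false], false)).1

-- ===== PRECONDITION & SPEC =====
-- Pre_ excludes exactly the inputs where A raises IndexError (price2 shorter than price1 and the loop runs).
def Pre_CrossUnder (price1 : List Int) (price2 : List Int) : Prop :=
  price1.length ≤ price2.length ∨ price1.length ≤ 1
instance (price1 : List Int) (price2 : List Int) : Decidable (Pre_CrossUnder price1 price2) := by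
  unfold Pre_CrossUnder; infer_instance
def pvWitness_CrossUnder : List Int × List Int := ([3, 1, 2], [2, 2, 2])
def Spec_CrossUnder (price1 : List Int) (price2 : List Int) (out : List Bool) : Prop := out = CrossUnder_alt price1 price2
instance (price1 : List Int) (price2 : List Int) (out : List Bool) : Decidable (Spec_CrossUnder price1 price2 out) := by unfold Spec_CrossUnder; infer_instance

-- ===== CLAIM (what is proved, stated in full; the proofs are below) =====
def Claim_equal_CrossUnder : Prop := ∀ (price1 : List Int) (price2 : List Int), Dom_CrossUnder price1 price2 → Pre_CrossUnder price1 price2 → Spec_CrossUnder price1 price2 (CrossUnder price1 price2)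

-- ===== LEMMAS AND PROOFS =====

-- B's running state after processing loop indices 1..m: the sign of the last unequal pair, false if none.
def pvL (p1 p2 : List Int) : Nat → Bool
  | 0 => false
  | m + 1 => if pvG p1 m ≠ pvG p2 m then decide (pvG p1 m > pvG p2 m) else pvL p1 p2 m

theorem pvGoA_shift (p1 p2 : List Int) : ∀ i c b, pvGoA p1 p2 (i + 1) (c + 1) b = pvGoA p1 p2 i c b + 1 := by
  intro i c b
  fun_induction pvGoA p1 p2 i c b with
  | case1 c b h ih =>
      conv_lhs => rw [pvGoA.eq_def]
      rw [dif_pos ⟨h.1, (by omega : 0 < i + 1 - (c + 1))⟩]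
      have h2 : i + 1 - (c + 1) - 1 = i - c - 1 := by omega
      rw [h2]; exact ih
  | case2 c b h =>
      conv_lhs => rw [pvGoA.eq_def]
      rw [dif_neg (fun hc => h ⟨hc.1, by omega⟩)]

theorem pvK (p1 p2 : List Int) : ∀ i, 1 ≤ i →
    decide (pvG p1 (i - pvGoA p1 p2 i 1 (decide (pvG p1 (i - 1) = pvG p2 (i - 1)))) >
            pvG p2 (i - pvGoA p1 p2 i 1 (decide (pvG p1 (i - 1) = pvG p2 (i - 1))))) = pvL p1 p2 i := by
  intro i
  induction i with
  | zero => omega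
  | succ k ih =>
      intro _
      have hi : k + 1 - 1 = k := rfl
      by_cases heq : pvG p1 k = pvG p2 k
      · -- equal at k: A's while loop steps past k; B keeps the old state
        rcases Nat.eq_zero_or_pos k with hk0 | hk1
        · subst hk0
          rw [pvGoA, dif_neg (by simp)]
          simp [pvL, heq]
        · have hb : (decide (pvG p1 (k + 1 - 1) = pvG p2 (k + 1 - 1))) = true := by
            simp [hi, heq]
          rw [pvGoA, dif_pos ⟨hb, by omega⟩]
          have h2 : k + 1 - 1 - 1 = k - 1 := by omega
          rw [h2, pvGoA_shift p1 p2 k 1]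
          have h3 : k + 1 - (pvGoA p1 p2 k 1 (decide (pvG p1 (k - 1) = pvG p2 (k - 1))) + 1) =
                    k - pvGoA p1 p2 k 1 (decide (pvG p1 (k - 1) = pvG p2 (k - 1))) := by omega
          rw [h3, ih hk1]
          simp [pvL, heq]
      · -- unequal at k: A's while loop stops immediately at index k
        have hb : (decide (pvG p1 (k + 1 - 1) = pvG p2 (k + 1 - 1))) = false := by
          simp [hi, heq]
        rw [pvGoA, dif_neg (by rw [hb]; simp)]
        simp only [hi, pvL, if_pos, heq, ne_eq, not_false_eq_true]

theorem pvMain (p1 p2 : List Int) : ∀ m,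
    ((List.range' 1 m).foldl
      (fun con i =>
        if pvG p1 i < pvG p2 i then
          let conter := pvGoA p1 p2 i 1 (decide (pvG p1 (i - 1) = pvG p2 (i - 1)))
          con ++ [decide (pvG p1 (i - conter) > pvG p2 (i - conter))]
        else con ++ [false])
      [false]
     =
     ((List.range' 1 m).foldl
      (fun (s : List Bool × Bool) i =>
        let above := if pvG p1 (i - 1) ≠ pvG p2 (i - 1)
                     then decide (pvG p1 (i - 1) > pvG p2 (i - 1)) else s.2
        (s.1 ++ [decide (pvG p1 i < pvG p2 i) && above], above))
      ([false], false)).1)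
    ∧
    ((List.range' 1 m).foldl
      (fun (s : List Bool × Bool) i =>
        let above := if pvG p1 (i - 1) ≠ pvG p2 (i - 1)
                     then decide (pvG p1 (i - 1) > pvG p2 (i - 1)) else s.2
        (s.1 ++ [decide (pvG p1 i < pvG p2 i) && above], above))
      ([false], false)).2 = pvL p1 p2 m := by
  intro m
  induction m with
  | zero => simp [pvL]
  | succ m ih =>
      rw [List.range'_concat, List.foldl_append, List.foldl_append]
      obtain ⟨ihA, ihB⟩ := ih
      simp only [List.foldl_cons, List.foldl_nil, Nat.one_mul]
      have h1 : 1 + m - 1 = m := by omega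
      have habove : (if pvG p1 (1 + m - 1) ≠ pvG p2 (1 + m - 1)
                     then decide (pvG p1 (1 + m - 1) > pvG p2 (1 + m - 1))
                     else ((List.range' 1 m).foldl
                       (fun (s : List Bool × Bool) i =>
                         let above := if pvG p1 (i - 1) ≠ pvG p2 (i - 1)
                                      then decide (pvG p1 (i - 1) > pvG p2 (i - 1)) else s.2
                         (s.1 ++ [decide (pvG p1 i < pvG p2 i) && above], above))
                       ([false], false)).2) = pvL p1 p2 (m + 1) := by
        rw [h1, ihB]
        by_cases heq : pvG p1 m = pvG p2 m <;> simp [pvL, heq]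
      have hk := pvK p1 p2 (1 + m) (by omega)
      refine ⟨?_, ?_⟩
      · rw [ihA]
        by_cases hlt : pvG p1 (1 + m) < pvG p2 (1 + m)
        · rw [if_pos hlt]
          simp only [List.append_cancel_left_eq, List.cons.injEq, and_true]
          rw [hk, habove]
          have hlt' : pvG p1 (m + 1) < pvG p2 (m + 1) := by rwa [Nat.add_comm] at hlt
          simp [hlt', Nat.add_comm]
        · rw [if_neg hlt]
          simp only [List.append_cancel_left_eq, List.cons.injEq, and_true]
          rw [habove]
          simp [hlt]
      · exact habove

theorem pvCrossUnder_eq (p1 p2 : List Int) : CrossUnder p1 p2 = CrossUnder_alt p1 p2 := by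
  unfold CrossUnder CrossUnder_alt
  exact (pvMain p1 p2 (p1.length - 1)).1

-- ===== VERDICT (by name: the statement is the Claim_ definition above) =====
theorem CrossUnder_spec : Claim_equal_CrossUnder := by
  intro p1 p2 _ _
  unfold Spec_CrossUnder
  exact pvCrossUnder_eq p1 p2
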